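-- pv_equiv track=rewrite | github.com/Bennyhwanggggg/Algorithm-and-Data-Structures-and-Coding-Challenges | Challenges/lotteryGame.py | lotterGame
-- ===== SOURCE A (Python) =====
-- def lotterGame(coupons):
-- 	res = float('inf')
-- 	seen = dict()
-- 	for idx, n in enumerate(coupons):
-- 		if n in seen:
-- 			res = min(res, idx - seen[n] + 1)
-- 		seen[n] = idx
--
-- 	return res if res != float('inf') else -1
-- ===== SOURCE B (Python) =====
-- def lotterGame(coupons):
--     groups = {}
--     for idx, n in enumerate(coupons):
--         groups.setdefault(n, []).append(idx)
--     best = float('inf')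
--     for idxs in groups.values():
--         for a, b in zip(idxs, idxs[1:]):
--             best = min(best, b - a + 1)
--     return best if best != float('inf') else -1
-- ===== Notes on version B (the rewrite author's own statement) =====
-- stated objective: alternative
-- what changed: Instead of tracking the last-seen index and updating the minimum inside one online loop, B first builds a dict of full index lists per value and then measures consecutive gaps in a separate pass.
import Mathlib
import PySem

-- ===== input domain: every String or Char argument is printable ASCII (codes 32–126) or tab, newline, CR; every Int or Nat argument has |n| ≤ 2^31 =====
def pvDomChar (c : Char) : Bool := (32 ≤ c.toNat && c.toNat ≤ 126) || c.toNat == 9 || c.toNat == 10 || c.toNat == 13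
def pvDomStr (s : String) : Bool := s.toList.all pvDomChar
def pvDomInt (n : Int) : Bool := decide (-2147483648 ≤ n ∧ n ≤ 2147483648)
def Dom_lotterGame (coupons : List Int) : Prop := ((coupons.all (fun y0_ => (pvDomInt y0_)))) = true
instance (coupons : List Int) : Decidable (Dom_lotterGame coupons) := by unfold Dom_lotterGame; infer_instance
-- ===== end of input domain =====

-- B replaces A's online last-seen-index minimum with a grouping pass (value -> all indices)
-- followed by a consecutive-gap scan per group; alternative decomposition, same asymptotic cost.


-- ===== PORT A =====
-- `min(res, x)` where res may still be float('inf'); none plays inf, so the result is always some value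
def pvMin (b : Option Int) (x : Int) : Option Int :=
  some (match b with | some v => min v x | none => x)

-- literal port of A: one pass, dict of last-seen indices, res updated on each repeat
def lotterGame (coupons : List Int) : Int :=
  let st := (PySem.List.enumerate coupons).foldl
    (fun (st : Option Int × PySem.Dict Int Int) p =>
      let res := match st.2.get? p.2 with      -- `if n in seen: min(res, idx - seen[n] + 1)`
        | some prev => pvMin st.1 (p.1 - prev + 1)
        | none => st.1
      (res, st.2.insert p.2 p.1))              -- `seen[n] = idx`
    (none, PySem.Dict.empty)
  match st.1 with | some r => r | none => -1

-- ===== PORT B =====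
-- inner loop of B: `for a, b in zip(idxs, idxs[1:]): best = min(best, b - a + 1)`
-- (idxs[1:] on a list = List.drop 1, exact since the start bound 1 is nonnegative)
def pvGapScan (b : Option Int) (idxs : List Int) : Option Int :=
  (idxs.zip (idxs.drop 1)).foldl (fun b q => pvMin b (q.2 - q.1 + 1)) b

-- literal port of B: grouping pass (setdefault+append = Dict.modify), then gap scan over the values
def lotterGame_alt (coupons : List Int) : Int :=
  let groups : PySem.Dict Int (List Int) :=
    (PySem.List.enumerate coupons).foldl
      (fun g p => g.modify p.2 [] (fun l => l ++ [p.1])) PySem.Dict.empty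
  let best := groups.values.foldl pvGapScan (none : Option Int)
  match best with | some r => r | none => -1

-- ===== PRECONDITION & SPEC =====
def Spec_lotterGame (coupons : List Int) (out : Int) : Prop := out = lotterGame_alt coupons
instance (coupons : List Int) (out : Int) : Decidable (Spec_lotterGame coupons out) := by unfold Spec_lotterGame; infer_instance

-- ===== CLAIM (what is proved, stated in full; the proofs are below) =====
def Claim_equal_lotterGame : Prop := ∀ (coupons : List Int), Dom_lotterGame coupons → Spec_lotterGame coupons (lotterGame coupons)

-- ===== LEMMAS AND PROOFS =====

-- gap scan over a whole items list (B's outer loop, expressed on g.items)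
def pvBestAll (b : Option Int) (items : List (Int × List Int)) : Option Int :=
  items.foldl (fun b p => pvGapScan b p.2) b

lemma pvMin_comm (b : Option Int) (x y : Int) :
    pvMin (pvMin b x) y = pvMin (pvMin b y) x := by
  cases b <;> simp [pvMin] <;> omega

lemma pvGapScan_pvMin (idxs : List Int) (b : Option Int) (x : Int) :
    pvGapScan (pvMin b x) idxs = pvMin (pvGapScan b idxs) x := by
  unfold pvGapScan
  induction (idxs.zip (idxs.drop 1)) generalizing b with
  | nil => rfl
  | cons q t ih =>
    simp only [List.foldl_cons]
    rw [pvMin_comm, ih]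

lemma pvBestAll_pvMin (items : List (Int × List Int)) (b : Option Int) (x : Int) :
    pvBestAll (pvMin b x) items = pvMin (pvBestAll b items) x := by
  induction items generalizing b with
  | nil => rfl
  | cons p t ih =>
    show pvBestAll (pvGapScan (pvMin b x) p.2) t = pvMin (pvBestAll (pvGapScan b p.2) t) x
    rw [pvGapScan_pvMin, ih]

-- appending a fresh singleton group adds no gap
lemma pvGapScan_singleton (b : Option Int) (x : Int) : pvGapScan b [x] = b := rfl

-- consecutive pairs of l ++ [x]: the pairs of l plus the one new gap (getLast, x)
lemma zip_drop_append (l : List Int) (x : Int) (h : l ≠ []) :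
    ((l ++ [x]).zip ((l ++ [x]).drop 1)) = (l.zip (l.drop 1)) ++ [(l.getLastD 0, x)] := by
  induction l with
  | nil => simp at h
  | cons a t ih =>
    cases t with
    | nil => rfl
    | cons b t' =>
      simp only [List.cons_append, List.drop_succ_cons, List.drop_zero, List.zip_cons_cons]
      have := ih (by simp)
      simp only [List.cons_append, List.drop_succ_cons, List.drop_zero] at this
      simp [this, List.getLastD]

lemma pvGapScan_append (b : Option Int) (l : List Int) (x : Int) (h : l ≠ []) :
    pvGapScan b (l ++ [x]) = pvMin (pvGapScan b l) (x - l.getLastD 0 + 1) := by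
  unfold pvGapScan
  rw [zip_drop_append l x h, List.foldl_append]
  rfl

-- extending an existing group inside the items list = pvMin with the new gap
lemma pvBestAll_replace (items : List (Int × List Int)) (n : Int) (l : List Int)
    (idx : Int) (hl : l ≠ []) : ∀ (b : Option Int),
    items.find? (fun p => p.1 == n) = some (n, l) →
    (items.map Prod.fst).Nodup →
    pvBestAll b (items.map (fun p => if p.1 == n then (n, l ++ [idx]) else p))
      = pvMin (pvBestAll b items) (idx - l.getLastD 0 + 1) := by
  induction items with
  | nil => intro b hfind _; simp at hfind
  | cons p t ih =>
    intro b hfind hnd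
    by_cases hp : p.1 = n
    · rw [List.find?_cons_of_pos (by simp [hp])] at hfind
      have hfound : p = (n, l) := Option.some.inj hfind
      subst hfound
      simp only [List.map_cons] at hnd
      have hnot : ∀ q ∈ t, q.1 ≠ n := by
        intro q hq he
        exact (List.nodup_cons.mp hnd).1 (by rw [← he]; exact List.mem_map_of_mem hq)
      have hmap : t.map (fun p => if p.1 == n then (n, l ++ [idx]) else p) = t := by
        conv_rhs => rw [← List.map_id t]
        apply List.map_congr_left
        intro q hq; simp [hnot q hq]
      simp only [List.map_cons, BEq.rfl, if_pos, hmap]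
      show pvBestAll (pvGapScan b (l ++ [idx])) t
            = pvMin (pvBestAll (pvGapScan b l) t) (idx - l.getLastD 0 + 1)
      rw [pvGapScan_append b l idx hl, pvBestAll_pvMin]
    · rw [List.find?_cons_of_neg (by simp [hp])] at hfind
      simp only [List.map_cons] at hnd ⊢
      rw [if_neg (by simp [hp])]
      show pvBestAll (pvGapScan b p.2) _ = pvMin (pvBestAll (pvGapScan b p.2) t) _
      exact ih _ hfind (List.nodup_cons.mp hnd).2

-- lookup in A's seen-dict through the items correspondence
lemma get?_mapped (items : List (Int × List Int)) (n : Int) :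
    (PySem.Dict.mk (items.map (fun p => (p.1, p.2.getLastD 0)))).get? n
      = ((PySem.Dict.mk items).get? n).map (fun l => l.getLastD 0) := by
  show (Option.map _ (List.find? _ (items.map _))) = _
  rw [List.find?_map]
  simp [PySem.Dict.get?, Function.comp_def, Option.map_map]

-- the A-side and B-side loop bodies, named so the invariant reads cleanly
def pvStepA (st : Option Int × PySem.Dict Int Int) (p : Int × Int) :
    Option Int × PySem.Dict Int Int :=
  let res := match st.2.get? p.2 with
    | some prev => pvMin st.1 (p.1 - prev + 1)
    | none => st.1
  (res, st.2.insert p.2 p.1)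

def pvStepB (g : PySem.Dict Int (List Int)) (p : Int × Int) : PySem.Dict Int (List Int) :=
  g.modify p.2 [] (fun l => l ++ [p.1])

-- the main invariant-carrying induction over the enumerated list
lemma pvMain (cs : List Int) : ∀ (s : Int) (res : Option Int)
    (seen : PySem.Dict Int Int) (g : PySem.Dict Int (List Int)),
    seen.items = g.items.map (fun p => (p.1, p.2.getLastD 0)) →
    (∀ p ∈ g.items, p.2 ≠ []) →
    (g.items.map Prod.fst).Nodup →
    res = pvBestAll none g.items →
    ((PySem.List.enumerate cs s).foldl pvStepA (res, seen)).1
      = pvBestAll none (((PySem.List.enumerate cs s).foldl pvStepB g).items) := by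
  induction cs with
  | nil =>
    intro s res seen g _ _ _ hres
    simpa [PySem.List.enumerate] using hres
  | cons n t ih =>
    intro s res seen g hseen hne hnd hres
    rw [PySem.List.enumerate_cons]
    simp only [List.foldl_cons]
    have hmod : pvStepB g (s, n) = g.insert n (g.getD n [] ++ [s]) := rfl
    by_cases hc : ∃ l, g.get? n = some l
    · obtain ⟨l, hgl⟩ := hc
      have hfind : g.items.find? (fun p => p.1 == n) = some (n, l) := by
        rcases hfo : g.items.find? (fun p => p.1 == n) with _ | p
        · simp [PySem.Dict.get?, hfo] at hgl
        · have hp2 : p.2 = l := by simpa [PySem.Dict.get?, hfo] using hgl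
          have hp1 : p.1 = n := by simpa using List.find?_some hfo
          rw [hfo, ← hp1, ← hp2]
      have hl : l ≠ [] := hne (n, l) (List.mem_of_find?_eq_some hfind)
      have hgetD : g.getD n [] = l := PySem.Dict.getD_of_get?_eq_some _ _ hgl
      have hcontains : g.contains n = true := by
        rw [PySem.Dict.contains_eq_isSome_get?, hgl]; rfl
      have hseenget : seen.get? n = some (l.getLastD 0) := by
        rcases seen with ⟨si⟩; rcases g with ⟨gi⟩
        simp only at hseen; subst hseen
        rw [get?_mapped]
        rw [show (PySem.Dict.mk gi).get? n = some l from hgl]; rfl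
      have hscontains : seen.contains n = true := by
        rw [PySem.Dict.contains_eq_isSome_get?, hseenget]; rfl
      have hitems : (g.insert n (l ++ [s])).items
          = g.items.map (fun p => if p.1 == n then (n, l ++ [s]) else p) :=
        PySem.Dict.items_insert_of_contains _ _ hcontains
      have hstepA : pvStepA (res, seen) (s, n)
          = (pvMin res (s - l.getLastD 0 + 1), seen.insert n s) := by
        simp [pvStepA, hseenget]
      rw [hstepA, hmod, hgetD]
      apply ih (s + 1) _ (seen.insert n s) (g.insert n (l ++ [s]))
      · rw [PySem.Dict.items_insert_of_contains _ _ hscontains, hitems, hseen,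
            List.map_map, List.map_map]
        apply List.map_congr_left
        intro p _
        by_cases hq : p.1 = n <;> simp [hq]
      · intro p hp
        rw [hitems] at hp
        obtain ⟨q, hq, hqe⟩ := List.mem_map.mp hp
        by_cases h1 : q.1 = n
        · rw [if_pos (by simp [h1])] at hqe; subst hqe; simp
        · rw [if_neg (by simp [h1])] at hqe; subst hqe; exact hne q hq
      · rw [hitems, List.map_map]
        have : g.items.map (Prod.fst ∘ fun p => if p.1 == n then (n, l ++ [s]) else p)
            = g.items.map Prod.fst := by
          apply List.map_congr_left
          intro p _
          by_cases hq : p.1 = n <;> simp [hq]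
        rw [this]; exact hnd
      · rw [hitems, pvBestAll_replace g.items n l s hl none hfind hnd, ← hres]
    · rw [not_exists] at hc
      have hgnone : g.get? n = none := by
        rcases hg : g.get? n with _ | l
        · rfl
        · exact absurd hg (hc l)
      have hcontains : g.contains n = false := by
        rw [PySem.Dict.contains_eq_isSome_get?, hgnone]; rfl
      have hseenget : seen.get? n = none := by
        rcases seen with ⟨si⟩; rcases g with ⟨gi⟩
        simp only at hseen; subst hseen
        rw [get?_mapped]
        rw [show (PySem.Dict.mk gi).get? n = none from hgnone]; rfl
      have hscontains : seen.contains n = false := by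
        rw [PySem.Dict.contains_eq_isSome_get?, hseenget]; rfl
      have hgetD : g.getD n [] = [] := PySem.Dict.getD_of_get?_eq_none _ _ hgnone
      have hitems : (g.insert n [s]).items = g.items ++ [(n, [s])] :=
        PySem.Dict.items_insert_of_not_contains _ _ hcontains
      have hstepA : pvStepA (res, seen) (s, n) = (res, seen.insert n s) := by
        simp [pvStepA, hseenget]
      rw [hstepA, hmod, hgetD]
      simp only [List.nil_append]
      apply ih (s + 1) _ (seen.insert n s) (g.insert n [s])
      · rw [PySem.Dict.items_insert_of_not_contains _ _ hscontains, hitems, hseen]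
        simp
      · intro p hp
        rw [hitems] at hp
        rcases List.mem_append.mp hp with h | h
        · exact hne p h
        · simp only [List.mem_singleton] at h; subst h; simp
      · rw [hitems]
        simp only [List.map_append, List.map_cons, List.map_nil]
        rw [List.nodup_append]
        refine ⟨hnd, List.nodup_singleton _, ?_⟩
        intro a ha b hb
        simp only [List.mem_singleton] at hb
        subst hb
        intro hean
        obtain ⟨q, hq, hqe⟩ := List.mem_map.mp ha
        have hq1 : g.get? q.1 ≠ none := by
          simp only [PySem.Dict.get?, ne_eq, Option.map_eq_none_iff]
          intro hfn
          have := List.find?_eq_none.mp hfn q hq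
          simp at this
        rw [hqe, hean] at hq1
        exact hq1 hgnone
      · rw [hitems, pvBestAll, List.foldl_append, ← pvBestAll]
        show res = pvGapScan (pvBestAll none g.items) [s]
        rw [pvGapScan_singleton, hres]

-- ===== VERDICT (by name: the statement is the Claim_ definition above) =====
theorem lotterGame_spec : Claim_equal_lotterGame := by
  intro coupons _
  show lotterGame coupons = lotterGame_alt coupons
  unfold lotterGame lotterGame_alt
  have h := pvMain coupons 0 none PySem.Dict.empty PySem.Dict.empty rfl
    (by intro p hp; simp [PySem.Dict.empty] at hp) (by simp [PySem.Dict.empty]) rfl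
  have hv : ∀ (g : PySem.Dict Int (List Int)),
      g.values.foldl pvGapScan (none : Option Int) = pvBestAll none g.items := by
    intro g
    rw [PySem.Dict.values, List.foldl_map]
    rfl
  simp only []
  rw [show (fun (st : Option Int × PySem.Dict Int Int) (p : Int × Int) =>
        (match st.2.get? p.2 with
          | some prev => pvMin st.1 (p.1 - prev + 1)
          | none => st.1, st.2.insert p.2 p.1)) = pvStepA from rfl]
  rw [show (fun (g : PySem.Dict Int (List Int)) (p : Int × Int) =>
        g.modify p.2 [] (fun l => l ++ [p.1])) = pvStepB from rfl]
  rw [hv, h]
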